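-- pv_equiv track=rewrite | github.com/tkoz0/problems-hackerrank | the-indian-job.py | indianJob
-- ===== SOURCE A (Python) =====
-- def indianJob(g, arr):
--     #
--     # Write your code here.
--     #
--     n = len(arr)
--     sums = set([0])
--     for r in arr:
--         sums2 = {r+s for s in sums}
--         sums |= sums2
--     s = sum(arr)
--     return 'YES' if min(max(z,s-z) for z in sums) <= g else 'NO'
--     '''
--     par1sum = 0
--     par2sum = 0
--     arr = sorted(arr,key=lambda x:-x)
--     for r in arr:
--         if par1sum < par2sum:
--             par1sum += r
--         else:
--             par2sum += r
--     return 'YES' if max(par1sum,par2sum) <= g else 'NO'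
--     '''
--     '''
--     n = len(arr)
--     arr = sorted(arr, key=lambda x:-x)
--     mins = 0
--     r1 = 0
--     r2 = 0
--     i = 0
--     while i < n:
--         z = min(r1,r2)
--         r1 -= z
--         r2 -= z
--         mins += z
--         if r1 == 0:
--             r1 = arr[i]
--         else:
--             r2 = arr[i]
--         i += 1
--         if i < n:
--             if r1 == 0:
--                 r1 = arr[i]
--                 i += 1
--             elif r2 == 0:
--                 r2 = arr[i]
--                 i += 1
--     return 'YES' if mins + max(r1,r2) <= g else 'NO'
--     '''
-- ===== SOURCE B (Python) =====
-- def _subsums(xs):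
--     # all subset sums of xs, as a set, by recursion on the list
--     if not xs:
--         return {0}
--     rest = _subsums(xs[1:])
--     return rest | {xs[0] + z for z in rest}
--
-- def _bisect_left(a, x):
--     # first index i with a[i] >= x, for ascending a (textbook bisect_left)
--     lo, hi = 0, len(a)
--     while lo < hi:
--         mid = (lo + hi) // 2
--         if a[mid] < x:
--             lo = mid + 1
--         else:
--             hi = mid
--     return lo
--
-- def indianJob(g, arr):
--     # Meet in the middle (alternative decomposition): subset sums of each half; a split with both parts <= g
--     # exists iff some z1 + z2 lies in [s - g, g]; test by binary search in the
--     # sorted second-half sums.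
--     n = len(arr)
--     s1 = _subsums(arr[:n // 2])
--     l2 = sorted(_subsums(arr[n // 2:]))
--     s = sum(arr)
--     ok = False
--     for z1 in s1:
--         i = _bisect_left(l2, s - g - z1)
--         if i < len(l2) and l2[i] <= g - z1:
--             ok = True
--     return 'YES' if ok else 'NO'
-- ===== Notes on version B (the rewrite author's own statement) =====
-- stated objective: alternative
-- what changed: Replaces A's single fold that enumerates all subset sums of the whole array with meet-in-the-middle: recursively computed subset-sum sets of the two halves, the second sorted, and a binary search per first-half sum for a partner in the feasible window [s-g-z1, g-z1].
import Mathlib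
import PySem

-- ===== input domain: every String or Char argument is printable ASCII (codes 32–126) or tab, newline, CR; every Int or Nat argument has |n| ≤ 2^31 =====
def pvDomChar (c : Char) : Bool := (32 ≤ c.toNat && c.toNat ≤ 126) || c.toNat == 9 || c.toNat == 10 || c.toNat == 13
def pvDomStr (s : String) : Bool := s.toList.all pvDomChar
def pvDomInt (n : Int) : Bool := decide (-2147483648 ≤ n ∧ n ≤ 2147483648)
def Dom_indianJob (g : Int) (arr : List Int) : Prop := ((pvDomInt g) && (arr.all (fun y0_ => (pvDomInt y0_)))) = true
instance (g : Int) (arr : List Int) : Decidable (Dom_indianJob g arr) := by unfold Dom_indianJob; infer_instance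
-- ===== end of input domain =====

-- B replaces A's full subset-sum enumeration of the whole array by meet-in-the-middle:
-- subset sums of each half plus a binary search in the sorted second-half sums (objective: alternative).


-- ===== PORT A =====
-- sums = set([0]); for r in arr: sums |= {r+s for s in sums}
-- return 'YES' if min(max(z, s-z) for z in sums) <= g else 'NO'
-- (the 'none' branch is unreachable: 0 is always in sums, so the set min exists)
def indianJob (g : Int) (arr : List Int) : String :=
  let sums : PySem.Set Int :=
    arr.foldl
      (fun sums r => PySem.Set.union sums (PySem.Set.ofList (sums.map (fun z => r + z))))
      (PySem.Set.ofList [0])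
  let s := arr.sum
  match PySem.List.min? (sums.map (fun z => max z (s - z))) (fun x => x) with
  | some m => if m ≤ g then "YES" else "NO"
  | none => "NO"

-- ===== PORT B =====
-- def _subsums(xs): if not xs: return {0}; rest = _subsums(xs[1:]); return rest | {xs[0]+z for z in rest}
def altSubsums (xs : List Int) : PySem.Set Int :=
  match xs with
  | [] => PySem.Set.ofList [0]
  | x :: tl =>
    let rest := altSubsums tl
    PySem.Set.union rest (PySem.Set.ofList (rest.map (fun z => x + z)))

-- s1 = _subsums(arr[:n//2]); l2 = sorted(_subsums(arr[n//2:])); s = sum(arr)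
-- ok = any over z1 in s1 of: i = _bisect_left(l2, s-g-z1); i < len(l2) and l2[i] <= g-z1
-- (_bisect_left in Source B is the textbook bisect_left loop, which is PySem.List.bisectLeft)
def indianJob_alt (g : Int) (arr : List Int) : String :=
  let n : Int := (arr.length : Int)
  let s1 := altSubsums (PySem.List.slice arr none (some (PySem.Int.floordiv n 2)))
  let l2 := PySem.List.sorted (altSubsums (PySem.List.slice arr (some (PySem.Int.floordiv n 2)) none)) (fun x => x) false
  let s := arr.sum
  let ok := s1.any (fun z1 =>
    let i := PySem.List.bisectLeft l2 (s - g - z1)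
    decide (i < l2.length) && decide (l2.getD i 0 ≤ g - z1))
  if ok then "YES" else "NO"

-- ===== PRECONDITION & SPEC =====
def Spec_indianJob (g : Int) (arr : List Int) (out : String) : Prop := out = indianJob_alt g arr
instance (g : Int) (arr : List Int) (out : String) : Decidable (Spec_indianJob g arr out) := by unfold Spec_indianJob; infer_instance

-- ===== CLAIM (what is proved, stated in full; the proofs are below) =====
def Claim_equal_indianJob : Prop := ∀ (g : Int) (arr : List Int), Dom_indianJob g arr → Spec_indianJob g arr (indianJob g arr)

-- ===== LEMMAS AND PROOFS =====

def SS (l : List Int) (z : Int) : Prop := ∃ u : List Int, u.Sublist l ∧ u.sum = z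

theorem SS_cons (x : Int) (l : List Int) (z : Int) :
    SS (x :: l) z ↔ SS l z ∨ SS l (z - x) := by
  constructor
  · rintro ⟨u, hu, rfl⟩
    rcases List.sublist_cons_iff.mp hu with h | ⟨u', rfl, h⟩
    · exact Or.inl ⟨u, h, rfl⟩
    · exact Or.inr ⟨u', h, by simp [List.sum_cons]⟩
  · rintro (⟨u, hu, rfl⟩ | ⟨u, hu, hz⟩)
    · exact ⟨u, hu.cons _, rfl⟩
    · exact ⟨x :: u, (List.cons_sublist_cons).mpr hu, by simp [List.sum_cons, hz]⟩

theorem SS_append (l1 l2 : List Int) (z : Int) :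
    SS (l1 ++ l2) z ↔ ∃ a b, SS l1 a ∧ SS l2 b ∧ z = a + b := by
  constructor
  · rintro ⟨u, hu, rfl⟩
    rcases List.sublist_append_iff.mp hu with ⟨u1, u2, rfl, h1, h2⟩
    exact ⟨u1.sum, u2.sum, ⟨u1, h1, rfl⟩, ⟨u2, h2, rfl⟩, by simp⟩
  · rintro ⟨a, b, ⟨u1, h1, rfl⟩, ⟨u2, h2, rfl⟩, rfl⟩
    exact ⟨u1 ++ u2, List.Sublist.append h1 h2, by simp⟩

theorem SS_nil (z : Int) : SS [] z ↔ z = 0 := by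
  constructor
  · rintro ⟨u, hu, rfl⟩; simp [List.sublist_nil.mp hu]
  · rintro rfl; exact ⟨[], List.Sublist.refl _, rfl⟩

theorem mem_foldA (l : List Int) (S : PySem.Set Int) (x : Int) :
    x ∈ l.foldl (fun sums r => PySem.Set.union sums (PySem.Set.ofList (sums.map (fun z => r + z)))) S
      ↔ ∃ y ∈ S, SS l (x - y) := by
  induction l generalizing S with
  | nil => simp [SS_nil, sub_eq_zero]
  | cons r tl ih =>
    rw [List.foldl_cons, ih]
    constructor
    · rintro ⟨y, hy, hss⟩
      rw [PySem.Set.mem_union _ _ _] at hy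
      rcases hy with hy | hy
      · exact ⟨y, hy, (SS_cons r tl _).mpr (Or.inl hss)⟩
      · rw [PySem.Set.mem_ofList, List.mem_map] at hy
        rcases hy with ⟨z, hz, rfl⟩
        exact ⟨z, hz, (SS_cons r tl _).mpr (Or.inr (by convert hss using 1; ring))⟩
    · rintro ⟨y, hy, hss⟩
      rcases (SS_cons r tl _).mp hss with h | h
      · exact ⟨y, (PySem.Set.mem_union _ _ _).mpr (Or.inl hy), h⟩
      · refine ⟨r + y, (PySem.Set.mem_union _ _ _).mpr (Or.inr ?_), by convert h using 1; ring⟩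
        exact (PySem.Set.mem_ofList _ _).mpr (List.mem_map.mpr ⟨y, hy, rfl⟩)

theorem mem_altSubsums (l : List Int) (x : Int) : x ∈ altSubsums l ↔ SS l x := by
  induction l generalizing x with
  | nil => simp [altSubsums, PySem.Set.ofList, SS_nil, PySem.Set.add]
  | cons r tl ih =>
    rw [altSubsums]
    simp only [PySem.Set.mem_union, PySem.Set.mem_ofList, List.mem_map, SS_cons]
    constructor
    · rintro (h | ⟨z, hz, rfl⟩)
      · exact Or.inl ((ih x).mp h)
      · exact Or.inr (by rw [show r + z - r = z by ring]; exact (ih z).mp hz)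
    · rintro (h | h)
      · exact Or.inl ((ih x).mpr h)
      · exact Or.inr ⟨x - r, (ih (x-r)).mpr h, by ring⟩

theorem bisect_window (l2 : List Int) (hs : l2.Pairwise (fun a b => a ≤ b)) (lo hi : Int) :
    ((decide (PySem.List.bisectLeft l2 lo < l2.length) &&
      decide (l2.getD (PySem.List.bisectLeft l2 lo) 0 ≤ hi)) = true)
      ↔ ∃ v ∈ l2, lo ≤ v ∧ v ≤ hi := by
  obtain ⟨hle, hlt, hge⟩ := PySem.List.bisectLeft_spec l2 lo hs
  set i := PySem.List.bisectLeft l2 lo with hi'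
  simp only [Bool.and_eq_true, decide_eq_true_eq]
  constructor
  · rintro ⟨h1, h2⟩
    refine ⟨l2[i], List.getElem_mem _, hge i h1 le_rfl, ?_⟩
    rwa [List.getD_eq_getElem l2 0 h1] at h2
  · rintro ⟨v, hv, hlov, hvhi⟩
    obtain ⟨j, hj, rfl⟩ := List.mem_iff_getElem.mp hv
    have hij : i ≤ j := by
      by_contra h
      exact absurd (hlt j hj (by omega)) (not_lt.mpr hlov)
    have h1 : i < l2.length := lt_of_le_of_lt hij hj
    refine ⟨h1, ?_⟩
    rw [List.getD_eq_getElem l2 0 h1]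
    rcases eq_or_lt_of_le hij with rfl | hlt'
    · exact hvhi
    · exact le_trans (List.pairwise_iff_getElem.mp hs i j h1 hj hlt') hvhi

theorem A_yes_iff (g : Int) (arr : List Int) :
    indianJob g arr = "YES" ↔ ∃ z, SS arr z ∧ max z (arr.sum - z) ≤ g := by
  simp only [indianJob]
  set sums := arr.foldl
      (fun sums r => PySem.Set.union sums (PySem.Set.ofList (sums.map (fun z => r + z))))
      (PySem.Set.ofList [0]) with hsums
  have hmem : ∀ z, z ∈ sums ↔ SS arr z := by
    intro z
    rw [hsums, mem_foldA]
    constructor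
    · rintro ⟨y, hy, h⟩
      simp only [PySem.Set.mem_ofList, List.mem_singleton] at hy
      subst hy; simpa using h
    · intro h; exact ⟨0, by simp [PySem.Set.mem_ofList], by simpa using h⟩
  have h0 : (0:Int) ∈ sums := (hmem 0).mpr ⟨[], List.nil_sublist _, rfl⟩
  have hne : sums.map (fun z => max z (arr.sum - z)) ≠ [] := by
    intro h; rw [List.map_eq_nil_iff] at h; rw [h] at h0; exact absurd h0 (List.not_mem_nil)
  obtain ⟨m, hm⟩ : ∃ m, PySem.List.min? (sums.map (fun z => max z (arr.sum - z))) (fun x => x) = some m := by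
    rcases h : PySem.List.min? (sums.map (fun z => max z (arr.sum - z))) (fun x => x) with _ | m
    · exact absurd ((PySem.List.min?_eq_none_iff _ _).mp h) hne
    · exact ⟨m, rfl⟩
  rw [hm]
  have hiff : m ≤ g ↔ ∃ z, SS arr z ∧ max z (arr.sum - z) ≤ g := by
    constructor
    · intro hmg
      obtain ⟨z, hz, rfl⟩ := List.mem_map.mp (PySem.List.min?_mem hm)
      exact ⟨z, (hmem z).mp hz, hmg⟩
    · rintro ⟨z, hz, hle⟩
      have := PySem.List.min?_isMin hm (max z (arr.sum - z))
        (List.mem_map.mpr ⟨z, (hmem z).mpr hz, rfl⟩)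
      exact le_trans this hle
  rw [← hiff]
  dsimp only
  split_ifs with h
  · exact iff_of_true rfl h
  · exact iff_of_false (by simp) h

theorem B_yes_iff (g : Int) (arr : List Int) :
    indianJob_alt g arr = "YES" ↔ ∃ z, SS arr z ∧ max z (arr.sum - z) ≤ g := by
  simp only [indianJob_alt]
  have hcast : PySem.Int.floordiv ((arr.length : Int)) 2 = ((arr.length / 2 : Nat) : Int) := by
    exact_mod_cast PySem.Int.floordiv_natCast arr.length 2
  rw [hcast, PySem.List.slice_to_natCast, PySem.List.slice_from_natCast]
  set k := arr.length / 2
  set h1 := arr.take k with hh1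
  set h2 := arr.drop k with hh2
  have harr : h1 ++ h2 = arr := List.take_append_drop k arr
  set l2 := PySem.List.sorted (altSubsums h2) (fun x => x) false with hl2
  have hsortmem : ∀ v, v ∈ l2 ↔ SS h2 v := by
    intro v; rw [hl2, PySem.List.mem_sorted, mem_altSubsums]
  have hpw : l2.Pairwise (fun a b => a ≤ b) := PySem.List.sorted_pairwise (altSubsums h2) (fun x => x)
  have hok : (altSubsums h1).any (fun z1 =>
      decide (PySem.List.bisectLeft l2 (arr.sum - g - z1) < l2.length) &&
      decide (l2.getD (PySem.List.bisectLeft l2 (arr.sum - g - z1)) 0 ≤ g - z1)) = true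
      ↔ ∃ z, SS arr z ∧ max z (arr.sum - z) ≤ g := by
    rw [List.any_eq_true]
    constructor
    · rintro ⟨z1, hz1, hp⟩
      obtain ⟨v, hv, hlov, hvhi⟩ := (bisect_window l2 hpw _ _).mp hp
      refine ⟨z1 + v, ?_, by omega⟩
      rw [← harr, SS_append]
      exact ⟨z1, v, (mem_altSubsums h1 z1).mp hz1, (hsortmem v).mp hv, rfl⟩
    · rintro ⟨z, hz, hle⟩
      rw [← harr, SS_append] at hz
      obtain ⟨a, b, ha, hb, rfl⟩ := hz
      refine ⟨a, (mem_altSubsums h1 a).mpr ha, ?_⟩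
      refine (bisect_window l2 hpw _ _).mpr ⟨b, (hsortmem b).mpr hb, ?_, ?_⟩ <;> omega
  rw [← hok]
  split_ifs with h
  · exact iff_of_true rfl h
  · exact iff_of_false (by simp) h

theorem only_yes_no_A (g : Int) (arr : List Int) : indianJob g arr = "YES" ∨ indianJob g arr = "NO" := by
  simp only [indianJob]
  rcases PySem.List.min? _ _ with _ | m
  · exact Or.inr rfl
  · dsimp only; split_ifs <;> simp

theorem only_yes_no_B (g : Int) (arr : List Int) : indianJob_alt g arr = "YES" ∨ indianJob_alt g arr = "NO" := by
  simp only [indianJob_alt]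
  split_ifs <;> simp

-- ===== VERDICT (by name: the statement is the Claim_ definition above) =====
theorem indianJob_spec : Claim_equal_indianJob := by
  intro g arr _
  unfold Spec_indianJob
  have h := (A_yes_iff g arr).trans (B_yes_iff g arr).symm
  rcases only_yes_no_A g arr with hA | hA <;> rcases only_yes_no_B g arr with hB | hB <;>
    simp_all
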